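-- pv_equiv track=rewrite | github.com/scrof182/chrome_history | chrome_history.py | danger_state
-- ===== SOURCE A (Python) =====
-- def danger_state(state):
-- 	state = str(state)
-- 	state_converter = {"0":"Not Dangerous", "1":"Dangerous", "2":"Dangerous URL", "3":"Dangerous Content", \
-- 	"4":"Content May Be Malicious", "5":"Uncommon Content", "6":"Dangerous But User Validated", \
-- 	"8":"Potentially Unwanted", "9":"Whitelisted by Policy"}
-- 	for key in state_converter.keys():
-- 		state = state.replace(key, state_converter[key])
-- 	return state
-- ===== SOURCE B (Python) =====
-- def danger_state(state):
-- 	state = str(state)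
-- 	mapping = {"0": "Not Dangerous", "1": "Dangerous", "2": "Dangerous URL", "3": "Dangerous Content",
-- 		"4": "Content May Be Malicious", "5": "Uncommon Content", "6": "Dangerous But User Validated",
-- 		"8": "Potentially Unwanted", "9": "Whitelisted by Policy"}
-- 	return "".join(mapping.get(c, c) for c in state)
-- ===== Notes on version B (the rewrite author's own statement) =====
-- stated objective: idiomatic
-- what changed: Replaces the nine sequential full-string str.replace passes with a single left-to-right pass mapping each character through the digit-to-description table and joining the pieces; equivalent because no replacement text contains a digit key.
import Mathlib
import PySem

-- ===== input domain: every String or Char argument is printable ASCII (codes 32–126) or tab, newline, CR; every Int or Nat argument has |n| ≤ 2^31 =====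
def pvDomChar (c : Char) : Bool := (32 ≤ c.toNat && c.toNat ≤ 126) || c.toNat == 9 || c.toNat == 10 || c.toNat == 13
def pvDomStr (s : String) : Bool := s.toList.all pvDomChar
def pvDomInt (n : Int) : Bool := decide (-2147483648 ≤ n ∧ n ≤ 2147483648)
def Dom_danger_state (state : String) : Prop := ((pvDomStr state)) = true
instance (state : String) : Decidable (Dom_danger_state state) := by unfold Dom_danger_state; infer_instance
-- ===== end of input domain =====

-- B replaces A's nine sequential full-string replaces by a single per-character mapping pass (idiomatic; same result).

-- ===== PORT A =====
-- A's dict literal, in insertion order.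
def dangerConv : PySem.Dict String String := PySem.Dict.ofList
  [("0", "Not Dangerous"), ("1", "Dangerous"), ("2", "Dangerous URL"), ("3", "Dangerous Content"),
   ("4", "Content May Be Malicious"), ("5", "Uncommon Content"), ("6", "Dangerous But User Validated"),
   ("8", "Potentially Unwanted"), ("9", "Whitelisted by Policy")]

-- str(state) on a str argument is the identity; the loop over .keys() is a foldl over them,
-- state_converter[key] is get? (always some here, so the .getD "" default is never used).
def danger_state (state : String) : String :=
  (PySem.Dict.keys dangerConv).foldl
    (fun s key => PySem.Str.replace s key ((PySem.Dict.get? dangerConv key).getD "")) state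

-- ===== PORT B =====
-- Source B's mapping literal is the same nine pairs; shared as dangerConv above.
-- ''.join(mapping.get(c, c) for c in state)
def danger_state_alt (state : String) : String :=
  PySem.Str.join ""
    (state.toList.map (fun c => PySem.Dict.getD dangerConv (String.ofList [c]) (String.ofList [c])))

-- ===== PRECONDITION & SPEC =====
def Spec_danger_state (state : String) (out : String) : Prop := out = danger_state_alt state
instance (state : String) (out : String) : Decidable (Spec_danger_state state out) := by unfold Spec_danger_state; infer_instance

-- ===== CLAIM (what is proved, stated in full; the proofs are below) =====
def Claim_equal_danger_state : Prop := ∀ (state : String), Dom_danger_state state → Spec_danger_state state (danger_state state)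

-- ===== LEMMAS AND PROOFS =====

-- single-character str.replace = per-character substitution
def substC (k : Char) (new : List Char) (l : List Char) : List Char :=
  l.flatMap (fun c => if c = k then new else [c])

theorem go_singleton (k : Char) (new : List Char) :
    ∀ (fuel : Nat) (l acc : List Char), l.length ≤ fuel →
    PySem.Chars.replace.go [k] new fuel l acc = acc.reverse ++ substC k new l := by
  intro fuel
  induction fuel with
  | zero => intro l acc h; simp at h; simp [h, PySem.Chars.replace.go, substC]
  | succ n ih =>
    intro l acc h
    cases l with
    | nil => simp [PySem.Chars.replace.go, substC]
    | cons c t =>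
      rw [PySem.Chars.replace.go]
      by_cases hc : c = k
      · subst hc
        simp [List.isPrefixOf, substC, ih t _ (by simpa using h)]
      · have hp : List.isPrefixOf [k] (c :: t) = false := by
          simp [List.isPrefixOf]; exact fun hh => hc hh.symm
        simp [hp, substC, ih t _ (by simpa using h), hc]

theorem replace_singleton (k : Char) (new l : List Char) :
    PySem.Chars.replace l [k] new = substC k new l := by
  rw [PySem.Chars.replace]
  simp [go_singleton k new l.length l [] (le_refl _)]

theorem join_nil_flatten (xss : List (List Char)) : PySem.Chars.join [] xss = xss.flatten := by
  show List.intercalate [] xss = xss.flatten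
  rw [List.intercalate]
  induction xss with
  | nil => simp
  | cons x xs ih => cases xs with
    | nil => simp
    | cons y ys => simp_all [List.intersperse]

-- A's nine cascaded substitutions, innermost first
def chainA (l : List Char) : List Char :=
  substC '9' "Whitelisted by Policy".toList
    (substC '8' "Potentially Unwanted".toList
      (substC '6' "Dangerous But User Validated".toList
        (substC '5' "Uncommon Content".toList
          (substC '4' "Content May Be Malicious".toList
            (substC '3' "Dangerous Content".toList
              (substC '2' "Dangerous URL".toList
                (substC '1' "Dangerous".toList
                  (substC '0' "Not Dangerous".toList l))))))))

def funB (c : Char) : List Char :=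
  (PySem.Dict.getD dangerConv (String.ofList [c]) (String.ofList [c])).toList

theorem substC_append (k : Char) (n a b : List Char) :
    substC k n (a ++ b) = substC k n a ++ substC k n b := by
  simp [substC]

theorem chainA_append (a b : List Char) : chainA (a ++ b) = chainA a ++ chainA b := by
  simp [chainA, substC_append]

theorem beq_ofList_false (k c : Char) (h : c ≠ k) :
    (String.ofList [k] == String.ofList [c]) = false := by
  simp [beq_eq_false_iff_ne, ← String.toList_inj, String.toList_ofList]
  exact fun hh => h hh.symm

theorem key_lemma (c : Char) : chainA [c] = funB c := by
  by_cases h0 : c = '0'; · subst h0; decide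
  by_cases h1 : c = '1'; · subst h1; decide
  by_cases h2 : c = '2'; · subst h2; decide
  by_cases h3 : c = '3'; · subst h3; decide
  by_cases h4 : c = '4'; · subst h4; decide
  by_cases h5 : c = '5'; · subst h5; decide
  by_cases h6 : c = '6'; · subst h6; decide
  by_cases h8 : c = '8'; · subst h8; decide
  by_cases h9 : c = '9'; · subst h9; decide
  have hA : chainA [c] = [c] := by
    simp [chainA, substC, h0, h1, h2, h3, h4, h5, h6, h8, h9]
  have hB : funB c = [c] := by
    have e0 := beq_ofList_false '0' c h0
    have e1 := beq_ofList_false '1' c h1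
    have e2 := beq_ofList_false '2' c h2
    have e3 := beq_ofList_false '3' c h3
    have e4 := beq_ofList_false '4' c h4
    have e5 := beq_ofList_false '5' c h5
    have e6 := beq_ofList_false '6' c h6
    have e8 := beq_ofList_false '8' c h8
    have e9 := beq_ofList_false '9' c h9
    simp only [funB, PySem.Dict.getD_eq_get?_getD]
    rw [show dangerConv = PySem.Dict.mk
      [("0", "Not Dangerous"), ("1", "Dangerous"), ("2", "Dangerous URL"), ("3", "Dangerous Content"),
       ("4", "Content May Be Malicious"), ("5", "Uncommon Content"), ("6", "Dangerous But User Validated"),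
       ("8", "Potentially Unwanted"), ("9", "Whitelisted by Policy")] from rfl]
    simp only [PySem.Dict.get?_mk_cons]
    have : ("0" == String.ofList [c]) = false := e0
    simp [e0, e1, e2, e3, e4, e5, e6, e8, e9, PySem.Dict.get?, String.toList_ofList]
  rw [hA, hB]

theorem chainA_eq_flatMap (l : List Char) : chainA l = l.flatMap funB := by
  induction l with
  | nil => simp [chainA, substC]
  | cons c t ih =>
    have : chainA (c :: t) = chainA [c] ++ chainA t := by
      rw [show (c :: t) = [c] ++ t from rfl, chainA_append]
    rw [this, key_lemma, ih, List.flatMap_cons]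

theorem danger_state_toList (state : String) :
    (danger_state state).toList = chainA state.toList := by
  unfold danger_state
  rw [show dangerConv = PySem.Dict.mk
    [("0", "Not Dangerous"), ("1", "Dangerous"), ("2", "Dangerous URL"), ("3", "Dangerous Content"),
     ("4", "Content May Be Malicious"), ("5", "Uncommon Content"), ("6", "Dangerous But User Validated"),
     ("8", "Potentially Unwanted"), ("9", "Whitelisted by Policy")] from rfl]
  simp [PySem.Dict.keys, PySem.Dict.get?, List.foldl, chainA,
    PySem.Str.toList_replace, replace_singleton]

theorem danger_state_alt_toList (state : String) :
    (danger_state_alt state).toList = state.toList.flatMap funB := by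
  have he : "".toList = ([] : List Char) := rfl
  have hf : (String.toList ∘ fun c => PySem.Dict.getD dangerConv (String.ofList [c]) (String.ofList [c])) = funB := rfl
  simp only [danger_state_alt, PySem.Str.join, String.toList_ofList, he, join_nil_flatten,
    List.flatMap_def, List.map_map, hf]

-- ===== VERDICT (by name: the statement is the Claim_ definition above) =====
theorem danger_state_spec : Claim_equal_danger_state := by
  intro state _
  unfold Spec_danger_state
  rw [← String.toList_inj, danger_state_toList, danger_state_alt_toList, chainA_eq_flatMap]
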